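-- pv_equiv track=rewrite | github.com/aran-tia/python-start | day31_problem4.py | get_sum_even
-- ===== SOURCE A (Python) =====
-- def get_sum_even(numbers):
--     count = {}
--
--     for n in numbers:
--         if n % 2 == 0:
--             if n in count:
--                 count[n] += 1
--             else:
--                 count[n] = 1
--
--     result = 0
--
--     for k, v in count.items():
--         if v >= 2:
--             result += v
--
--     return result
-- ===== SOURCE B (Python) =====
-- def get_sum_even(numbers):
--     s = sorted(n for n in numbers if n % 2 == 0)
--     total = 0
--     i = 0
--     while i < len(s):
--         j = i + 1
--         while j < len(s) and s[j] == s[i]: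
--             j += 1
--         if j - i >= 2:
--             total += j - i
--         i = j
--     return total
-- ===== Notes on version B (the rewrite author's own statement) =====
-- stated objective: alternative
-- what changed: Replaces the hash-count dictionary and the per-key second loop by sort-then-scan: collect the evens, sort them, and walk the sorted list once, adding the length of every run of equal values whose length is at least 2.
import Mathlib
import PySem

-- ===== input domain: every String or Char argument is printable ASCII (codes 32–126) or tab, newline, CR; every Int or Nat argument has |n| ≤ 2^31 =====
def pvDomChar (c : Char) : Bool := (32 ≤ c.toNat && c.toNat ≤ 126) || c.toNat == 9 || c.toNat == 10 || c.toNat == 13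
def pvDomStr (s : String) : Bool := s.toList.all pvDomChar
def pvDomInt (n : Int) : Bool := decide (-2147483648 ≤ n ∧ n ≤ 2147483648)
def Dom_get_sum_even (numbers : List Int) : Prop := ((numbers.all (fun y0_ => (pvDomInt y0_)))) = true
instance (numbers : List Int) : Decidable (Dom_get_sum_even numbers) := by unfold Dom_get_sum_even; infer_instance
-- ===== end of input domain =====

-- B replaces A's hash-count dictionary with sort-then-scan over runs of equal values; alternative algorithm, no speed claim.


-- ===== PORT A =====
def get_sum_even (numbers : List Int) : Int :=
  let count : PySem.Dict Int Int := numbers.foldl (fun d n =>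
    if PySem.Int.mod n 2 == 0 then
      if d.contains n then d.insert n (d.getD n 0 + 1)
      else d.insert n 1
    else d) PySem.Dict.empty
  count.items.foldl (fun r kv => if 2 ≤ kv.2 then r + kv.2 else r) 0

-- ===== PORT B =====
-- the two nested while loops of B: the inner while scans the current run of equal
-- values (takeWhile), the outer loop resumes after it (dropWhile); j - i is the run length
def pvRunsum : List Int → Int
  | [] => 0
  | x :: rest =>
    let run : Nat := 1 + (rest.takeWhile (fun y => y == x)).length
    (if 2 ≤ run then (run : Int) else 0) + pvRunsum (rest.dropWhile (fun y => y == x))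
termination_by l => l.length
decreasing_by
  simpa using Nat.lt_succ_of_le (List.length_dropWhile_le _ _)

def get_sum_even_alt (numbers : List Int) : Int :=
  let s := PySem.List.sorted (numbers.filter (fun n => PySem.Int.mod n 2 == 0)) (fun x => x) false
  pvRunsum s

-- ===== PRECONDITION & SPEC =====
def Spec_get_sum_even (numbers : List Int) (out : Int) : Prop := out = get_sum_even_alt numbers
instance (numbers : List Int) (out : Int) : Decidable (Spec_get_sum_even numbers out) := by unfold Spec_get_sum_even; infer_instance

-- ===== CLAIM (what is proved, stated in full; the proofs are below) =====
def Claim_equal_get_sum_even : Prop := ∀ (numbers : List Int), Dom_get_sum_even numbers → Spec_get_sum_even numbers (get_sum_even numbers)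

-- ===== LEMMAS AND PROOFS =====

-- pushing a filter-guard out of a foldl
theorem pv_foldl_filter_if {α β : Type} (p : α → Bool) (g : β → α → β) :
    ∀ (l : List α) (d : β),
      l.foldl (fun d n => if p n then g d n else d) d = (l.filter p).foldl g d := by
  intro l
  induction l with
  | nil => intro d; rfl
  | cons a t ih =>
    intro d
    by_cases h : p a = true <;> simp [h, ih]

-- A's contains-branch is the uniform counting step
theorem pv_step_eq (d : PySem.Dict Int Int) (n : Int) :
    (if d.contains n then d.insert n (d.getD n 0 + 1) else d.insert n 1)
      = d.insert n (d.getD n 0 + 1) := by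
  by_cases h : d.contains n = true
  · simp [h]
  · have h0 : d.getD n 0 = 0 :=
      PySem.Dict.getD_of_not_contains d 0 (by simpa using h)
    simp [h, h0]

-- the second loop is a sum
theorem pv_foldl_if_add : ∀ (l : List (Int × Int)) (r : Int),
    l.foldl (fun r kv => if 2 ≤ kv.2 then r + kv.2 else r) r
      = r + (l.map (fun kv => if 2 ≤ kv.2 then kv.2 else 0)).sum := by
  intro l
  induction l with
  | nil => intro r; simp
  | cons a t ih =>
    intro r
    by_cases h : 2 ≤ a.2 <;> simp [h, ih, add_assoc]

-- the canonical (order-free) value both programs compute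
def pvVal (E : List Int) : Int :=
  ∑ k ∈ E.toFinset, (if 2 ≤ E.count k then (E.count k : Int) else 0)

-- a list-sum over a Nodup key list with the full key set is the Finset sum
theorem pv_sum_ofList (E : List Int) :
    (((PySem.Set.ofList E).map
        (fun k => if 2 ≤ E.count k then (E.count k : Int) else 0)).sum) = pvVal E := by
  unfold pvVal
  have hset : (PySem.Set.ofList E).toFinset = E.toFinset := by
    apply Finset.ext
    intro a
    simp [PySem.Set.mem_ofList]
  rw [← hset, List.sum_toFinset _ (PySem.Set.nodup_ofList E)]

-- the run-length scan of a sorted list computes pvVal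
theorem pv_runsum_sorted : ∀ (s : List Int), s.Pairwise (· ≤ ·) →
    pvRunsum s = pvVal s := by
  intro s
  induction s using pvRunsum.induct with
  | case1 =>
    intro _
    simp [pvRunsum, pvVal]
  | case2 x rest ih =>
    intro hs
    have hpair := (List.pairwise_cons.mp hs)
    have hxle : ∀ y ∈ rest, x ≤ y := hpair.1
    have hrest : rest.Pairwise (· ≤ ·) := hpair.2
    set t := rest.takeWhile (fun y => y == x) with ht
    set d := rest.dropWhile (fun y => y == x) with hd
    have htd : t ++ d = rest := List.takeWhile_append_dropWhile
    have htx : ∀ y ∈ t, y = x := by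
      intro y hy
      have := List.mem_takeWhile_imp hy
      simpa using this
    -- every element of d is strictly greater than x
    have hdgt : ∀ y ∈ d, x < y := by
      have hdsub : d.Sublist rest := (List.dropWhile_suffix _).sublist
      have hdp : d.Pairwise (· ≤ ·) := hrest.sublist hdsub
      intro y hy
      cases hdd : d with
      | nil => rw [hdd] at hy; cases hy
      | cons b d' =>
        have hbne : ¬ (b == x) = true := by
          have := List.head?_dropWhile_not (fun y => y == x) rest
          rw [← hd, hdd] at this
          simpa using this
        have hbx : b ≠ x := by simpa using hbne
        have hbmem : b ∈ rest := by
          rw [← htd, hdd]; exact List.mem_append_right _ (List.mem_cons_self ..)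
        have hxb : x < b := lt_of_le_of_ne (hxle b hbmem) (Ne.symm hbx)
        rw [hdd] at hy
        rcases List.mem_cons.mp hy with rfl | hy'
        · exact hxb
        · have hby : b ≤ y := by
            rw [hdd] at hdp
            exact (List.pairwise_cons.mp hdp).1 y hy'
          exact lt_of_lt_of_le hxb hby
    have hdne : ∀ y ∈ d, y ≠ x := fun y hy => ne_of_gt (hdgt y hy)
    have hxd : x ∉ d := fun h => (hdne x h) rfl
    -- counts
    have hct : t.count x = t.length := by
      rw [List.count_eq_length]
      intro b hb
      exact (htx b hb).symm
    have hcd : d.count x = 0 := List.count_eq_zero.mpr hxd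
    have hcount_x : (x :: rest).count x = 1 + t.length := by
      rw [List.count_cons_self, ← htd, List.count_append, hct, hcd]
      omega
    have hcount_ne : ∀ k : Int, k ≠ x → (x :: rest).count k = d.count k := by
      intro k hk
      have hct0 : t.count k = 0 := by
        rw [List.count_eq_zero]
        intro hkt
        exact hk (htx k hkt)
      rw [← htd]
      simp [List.count_cons, List.count_append, hct0]
      exact fun e => hk e.symm
    -- key sets
    have hfin : (x :: rest).toFinset = insert x d.toFinset := by
      apply Finset.ext
      intro a
      simp only [← htd, List.toFinset_cons, List.toFinset_append, Finset.mem_insert,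
        Finset.mem_union, List.mem_toFinset]
      constructor
      · rintro (rfl | h | h)
        · exact Or.inl rfl
        · exact Or.inl (htx a h)
        · exact Or.inr h
      · rintro (rfl | h)
        · exact Or.inl rfl
        · exact Or.inr (Or.inr h)
    have hxnotin : x ∉ d.toFinset := by simpa using hxd
    -- d is sorted, apply the IH
    have hdp : d.Pairwise (· ≤ ·) := hrest.sublist (List.dropWhile_suffix _).sublist
    rw [pvRunsum]
    simp only [← ht, ← hd]
    rw [ih hdp]
    unfold pvVal
    rw [hfin, Finset.sum_insert hxnotin, hcount_x]
    have hcongr : ∀ k ∈ d.toFinset,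
        (if 2 ≤ (x :: rest).count k then ((x :: rest).count k : Int) else 0)
          = (if 2 ≤ d.count k then (d.count k : Int) else 0) := by
      intro k hk
      rw [hcount_ne k (hdne k (List.mem_toFinset.mp hk))]
    rw [Finset.sum_congr rfl hcongr]

-- main equivalence
theorem pv_main (numbers : List Int) :
    get_sum_even numbers = get_sum_even_alt numbers := by
  simp only [get_sum_even, get_sum_even_alt]
  set p : Int → Bool := fun n => PySem.Int.mod n 2 == 0 with hp
  set E : List Int := numbers.filter p with hE
  -- A's build loop is counter E
  have hbuild : numbers.foldl (fun d n =>
      if p n then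
        if d.contains n then d.insert n (d.getD n 0 + 1)
        else d.insert n 1
      else d) PySem.Dict.empty = PySem.Dict.counter E := by
    have h1 : (fun (d : PySem.Dict Int Int) n =>
        if p n then
          if d.contains n then d.insert n (d.getD n 0 + 1)
          else d.insert n 1
        else d) = (fun d n => if p n then d.insert n (d.getD n 0 + 1) else d) := by
      funext d n
      by_cases h : p n = true <;> simp [h, pv_step_eq]
    rw [h1, pv_foldl_filter_if, ← hE, PySem.Dict.foldl_insert_getD_add_one_eq_counter]
  rw [hbuild, pv_foldl_if_add, PySem.Dict.items_counter, zero_add, List.map_map]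
  -- A's value is pvVal E
  have hA : ((PySem.Set.ofList E).map
      ((fun kv : Int × Int => if 2 ≤ kv.2 then kv.2 else 0) ∘ fun k => (k, (E.count k : Int)))).sum
      = pvVal E := by
    rw [← pv_sum_ofList E]
    apply congrArg List.sum
    apply List.map_congr_left
    intro k _
    by_cases h : 2 ≤ E.count k
    · have h2 : (2 : Int) ≤ (E.count k : Int) := by exact_mod_cast h
      simp [h, h2, Function.comp]
    · have h2 : ¬ (2 : Int) ≤ (E.count k : Int) := by exact_mod_cast h
      simp [h, h2, Function.comp]
  rw [hA]
  -- B's value is pvVal of the sorted list = pvVal E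
  have hperm : (PySem.List.sorted E (fun x => x) false).Perm E :=
    PySem.List.sorted_perm E (fun x => x) false
  have hsorted : (PySem.List.sorted E (fun x => x) false).Pairwise (· ≤ ·) := by
    simpa using PySem.List.sorted_pairwise E (fun x => x)
  rw [pv_runsum_sorted _ hsorted]
  unfold pvVal
  rw [List.toFinset_eq_of_perm _ _ hperm]
  apply Finset.sum_congr rfl
  intro k _
  rw [hperm.count_eq]

-- ===== VERDICT (by name: the statement is the Claim_ definition above) =====
theorem get_sum_even_spec : Claim_equal_get_sum_even := by
  intro numbers _
  unfold Spec_get_sum_even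
  exact pv_main numbers
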